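-- pv_equiv track=rewrite | github.com/MAunZaidi/Hacker-Rank-June-Solution | HackerRank Certificate (June)/Sentence_Transformer.py | transformSentence
-- ===== SOURCE A (Python) =====
-- def transformSentence(sentence):
--     sentence = sentence.strip()
--     result = ""
--     for index, current_word in enumerate(sentence):
--         if(index==0):
--             result+=current_word
--         elif current_word==' ':
--             result += current_word
--         else:
--             previous_value = sentence[index-1]
--             if(previous_value==' '):
--                 result+=current_word
--             elif(previous_value.lower()<current_word.lower()):
--                 result+=current_word.upper()
--             elif(previous_value.lower()>current_word.lower()):
--                 result += current_word.lower()
--             else: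
--                 result += current_word
--     return result
-- ===== SOURCE B (Python) =====
-- def _rule(prev, cur):
--     p, q = prev.lower(), cur.lower()
--     if p < q:
--         return cur.upper()
--     if p > q:
--         return cur.lower()
--     return cur
--
--
-- def transformSentence(sentence):
--     words = sentence.strip().split(' ')
--     return ' '.join(
--         w[:1] + ''.join(_rule(p, c) for p, c in zip(w, w[1:]))
--         for w in words
--     )
-- ===== Notes on version B (the rewrite author's own statement) =====
-- stated objective: simpler
-- what changed: Replaces the flat indexed scan over the whole stripped sentence (per-index lookbehind via sentence[index-1] and explicit space/word-boundary branches) by a word-level decomposition: split on the literal space, transform each word by zipping it with its own tail, and rejoin with spaces, so the space and word-boundary branches disappear.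
import Mathlib
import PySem

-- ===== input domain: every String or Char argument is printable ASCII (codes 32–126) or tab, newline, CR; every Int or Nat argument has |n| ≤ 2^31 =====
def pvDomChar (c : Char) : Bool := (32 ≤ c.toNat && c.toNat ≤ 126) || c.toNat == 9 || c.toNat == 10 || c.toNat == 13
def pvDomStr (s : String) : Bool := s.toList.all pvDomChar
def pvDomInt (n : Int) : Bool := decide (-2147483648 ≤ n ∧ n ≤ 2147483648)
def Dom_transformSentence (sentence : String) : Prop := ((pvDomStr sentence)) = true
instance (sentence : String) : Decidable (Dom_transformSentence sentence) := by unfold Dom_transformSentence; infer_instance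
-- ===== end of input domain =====

-- B replaces A's flat indexed scan with lookbehind by a split-on-space / per-word
-- zip-with-tail transform / rejoin decomposition (objective: simpler; same return value).

-- ===== PORT A =====
-- literal transliteration of A's indexed scan; 'sentence[index-1]' is read with pyGetD
-- (that branch has index ≥ 1, so the index is in range whenever Python evaluates it)
def transformSentence (sentence : String) : String :=
  let s := PySem.Chars.strip sentence.toList
  String.ofList ((PySem.List.enumerate s).foldl (fun result ic =>
    let index := ic.1
    let current_word := ic.2
    if index = 0 then result ++ [current_word]
    else if current_word = ' ' then result ++ [current_word]
    else
      let previous_value := PySem.List.pyGetD s (index - 1) ' '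
      if previous_value = ' ' then result ++ [current_word]
      else if PySem.Chars.lowerChar previous_value < PySem.Chars.lowerChar current_word then
        result ++ [PySem.Chars.upperChar current_word]
      else if PySem.Chars.lowerChar previous_value > PySem.Chars.lowerChar current_word then
        result ++ [PySem.Chars.lowerChar current_word]
      else result ++ [current_word]) [])

-- ===== PORT B =====
-- _rule of Source B
def pvRule (prev cur : Char) : Char :=
  if PySem.Chars.lowerChar prev < PySem.Chars.lowerChar cur then PySem.Chars.upperChar cur
  else if PySem.Chars.lowerChar prev > PySem.Chars.lowerChar cur then PySem.Chars.lowerChar cur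
  else cur

-- w[:1] + ''.join(_rule(p, c) for p, c in zip(w, w[1:]))
def pvWordB (w : List Char) : List Char :=
  w.take 1 ++ (w.zip w.tail).map (fun pc => pvRule pc.1 pc.2)

def transformSentence_alt (sentence : String) : String :=
  let words := PySem.Chars.splitOn (PySem.Chars.strip sentence.toList) [' ']
  String.ofList (PySem.Chars.join [' '] (words.map pvWordB))

-- ===== PRECONDITION & SPEC =====
def Spec_transformSentence (sentence : String) (out : String) : Prop := out = transformSentence_alt sentence
instance (sentence : String) (out : String) : Decidable (Spec_transformSentence sentence out) := by unfold Spec_transformSentence; infer_instance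

-- ===== CLAIM (what is proved, stated in full; the proofs are below) =====
def Claim_equal_transformSentence : Prop := ∀ (sentence : String), Dom_transformSentence sentence → Spec_transformSentence sentence (transformSentence sentence)

-- ===== LEMMAS AND PROOFS =====

-- per-character rule of A for non-first characters (previous char p, current c)
def pvStep (p c : Char) : Char := if c = ' ' then c else if p = ' ' then c else pvRule p c

-- A's scan, as a structural recursion carrying the previous character
def pvGo : Char → List Char → List Char
  | _, [] => []
  | p, c :: t => pvStep p c :: pvGo c t

-- B's per-word zip map, as the same shape of recursion
def pvGoW : Char → List Char → List Char
  | _, [] => []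
  | p, c :: t => pvRule p c :: pvGoW c t

-- structural split on ' ' : (first word, remaining words)
def pvSplit : List Char → List Char × List (List Char)
  | [] => ([], [])
  | c :: t => let r := pvSplit t; if c = ' ' then ([], r.1 :: r.2) else (c :: r.1, r.2)

-- the per-element function of A's fold (s = the stripped sentence)
def pvFA (s : List Char) (ic : Int × Char) : Char :=
  if ic.1 = 0 then ic.2
  else if ic.2 = ' ' then ic.2
  else
    let p := PySem.List.pyGetD s (ic.1 - 1) ' '
    if p = ' ' then ic.2
    else if PySem.Chars.lowerChar p < PySem.Chars.lowerChar ic.2 then PySem.Chars.upperChar ic.2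
    else if PySem.Chars.lowerChar p > PySem.Chars.lowerChar ic.2 then PySem.Chars.lowerChar ic.2
    else ic.2

lemma pvZip_eq_goW : ∀ (t : List Char) (p : Char),
    ((p :: t).zip t).map (fun pc => pvRule pc.1 pc.2) = pvGoW p t := by
  intro t
  induction t with
  | nil => intro p; rfl
  | cons c t ih => intro p; simp only [List.zip_cons_cons, List.map_cons, pvGoW, ih c]

lemma pvWordB_cons (c : Char) (w : List Char) : pvWordB (c :: w) = c :: pvGoW c w := by
  simp [pvWordB, pvZip_eq_goW]

lemma pvSplitOn_go_spec : ∀ (fuel : Nat) (l cur : List Char) (acc : List (List Char)), l.length < fuel →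
    PySem.Chars.splitOn.go [' '] fuel l cur acc =
      acc.reverse ++ (cur.reverse ++ (pvSplit l).1) :: (pvSplit l).2 := by
  intro fuel
  induction fuel with
  | zero => intro l cur acc h; omega
  | succ fuel ih =>
    intro l cur acc h
    match l with
    | [] => simp [show PySem.Chars.splitOn.go [' '] (fuel+1) [] cur acc = (cur.reverse :: acc).reverse from rfl, pvSplit]
    | c :: rest =>
      rw [show PySem.Chars.splitOn.go [' '] (fuel+1) (c :: rest) cur acc =
            if List.isPrefixOf [' '] (c :: rest) then
              PySem.Chars.splitOn.go [' '] fuel (List.drop 1 (c :: rest)) [] (cur.reverse :: acc)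
            else PySem.Chars.splitOn.go [' '] fuel rest (c :: cur) acc from rfl]
      by_cases hc : c = ' '
      · subst hc
        rw [if_pos (by simp [List.isPrefixOf])]
        rw [show List.drop 1 (' ' :: rest) = rest from rfl]
        rw [ih rest [] (List.reverse cur :: acc) (by simp at h ⊢; omega)]
        simp [pvSplit]
      · rw [if_neg (by simp [List.isPrefixOf]; exact fun hh => hc hh.symm)]
        rw [ih rest (c :: cur) acc (by simp at h ⊢; omega)]
        simp [pvSplit, hc]

lemma pvSplitOn_eq (l : List Char) :
    PySem.Chars.splitOn l [' '] = (pvSplit l).1 :: (pvSplit l).2 := by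
  unfold PySem.Chars.splitOn
  rw [pvSplitOn_go_spec (l.length + 1) l [] [] (by omega)]
  simp

lemma pvJoin_cons (w : List Char) (ws : List (List Char)) :
    PySem.Chars.join [' '] (w :: ws) = w ++ ws.flatMap (fun v => ' ' :: v) := by
  induction ws generalizing w with
  | nil => simp [PySem.Chars.join_singleton]
  | cons v ws ih => rw [PySem.Chars.join_cons_cons, ih]; simp

-- A's fold is the map of pvFA over the enumeration
lemma pvFoldA_eq_map (s : List Char) (t : List (Int × Char)) :
    t.foldl (fun result ic =>
      let index := ic.1
      let current_word := ic.2
      if index = 0 then result ++ [current_word]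
      else if current_word = ' ' then result ++ [current_word]
      else
        let previous_value := PySem.List.pyGetD s (index - 1) ' '
        if previous_value = ' ' then result ++ [current_word]
        else if PySem.Chars.lowerChar previous_value < PySem.Chars.lowerChar current_word then
          result ++ [PySem.Chars.upperChar current_word]
        else if PySem.Chars.lowerChar previous_value > PySem.Chars.lowerChar current_word then
          result ++ [PySem.Chars.lowerChar current_word]
        else result ++ [current_word]) [] = t.map (pvFA s) := by
  have hbody : ∀ (acc : List Char) (ic : Int × Char), (_ : ic ∈ t) →
      (fun result (ic : Int × Char) =>
        let index := ic.1
        let current_word := ic.2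
        if index = 0 then result ++ [current_word]
        else if current_word = ' ' then result ++ [current_word]
        else
          let previous_value := PySem.List.pyGetD s (index - 1) ' '
          if previous_value = ' ' then result ++ [current_word]
          else if PySem.Chars.lowerChar previous_value < PySem.Chars.lowerChar current_word then
            result ++ [PySem.Chars.upperChar current_word]
          else if PySem.Chars.lowerChar previous_value > PySem.Chars.lowerChar current_word then
            result ++ [PySem.Chars.lowerChar current_word]
          else result ++ [current_word]) acc ic = acc ++ [pvFA s ic] := by
    intro acc ic _
    simp only [pvFA]
    split_ifs <;> rfl
  rw [PySem.List.foldl_congr_mem t _ (fun acc ic => acc ++ [pvFA s ic]) [] hbody,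
    PySem.List.foldl_append_singleton_eq_map]
  simp

-- the tail of A's enumeration, mapped through pvFA, is pvGo of the previous character
lemma pvEnum_map_go (l : List Char) : ∀ (t : List Char) (k : Nat) (p : Char),
    l.drop k = p :: t →
    (PySem.List.enumerate t ((k : Int) + 1)).map (pvFA l) = pvGo p t := by
  intro t
  induction t with
  | nil => intro k p _; rfl
  | cons c t ih =>
    intro k p hdrop
    have hget : l[k]? = some p := by
      have h0 : (l.drop k)[0]? = l[k + 0]? := List.getElem?_drop
      rw [hdrop] at h0
      simpa using h0.symm
    have hdrop2 : l.drop (k + 1) = c :: t := by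
      have h1 : l.drop (k + 1) = (l.drop k).drop 1 := by rw [List.drop_drop]
      rw [h1, hdrop]
      rfl
    have hprev : PySem.List.pyGetD l ((k : Int) + 1 - 1) ' ' = p := by
      have he : ((k : Int) + 1 - 1) = ((k : Nat) : Int) := by ring
      rw [he, PySem.List.pyGetD_natCast]
      simp [List.getD, hget]
    have hk0 : ((k : Int) + 1) ≠ 0 := by omega
    have hstep : pvFA l ((k : Int) + 1, c) = pvStep p c := by
      simp only [pvFA, pvStep, pvRule, if_neg hk0, hprev]
    rw [show PySem.List.enumerate (c :: t) ((k : Int) + 1) =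
          ((k : Int) + 1, c) :: PySem.List.enumerate t (((k : Int) + 1) + 1) from rfl]
    rw [List.map_cons, hstep]
    have hcast : ((k : Int) + 1) + 1 = (((k + 1 : Nat) : Int)) + 1 := by push_cast; ring
    rw [hcast, ih (k + 1) c hdrop2]
    rfl

-- the main combinatorial fact: A's scan equals B's split/transform/join, over any word list
lemma pvGo_split (t : List Char) :
    (∀ p, p ≠ ' ' → pvGo p t = pvGoW p (pvSplit t).1 ++ (pvSplit t).2.flatMap (fun w => ' ' :: pvWordB w)) ∧
    (pvGo ' ' t = pvWordB (pvSplit t).1 ++ (pvSplit t).2.flatMap (fun w => ' ' :: pvWordB w)) := by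
  induction t with
  | nil => exact ⟨fun p _ => rfl, rfl⟩
  | cons c t ih =>
    obtain ⟨iha, ihb⟩ := ih
    by_cases hc : c = ' '
    · subst hc
      constructor
      · intro p hp
        simp [pvGo, pvStep, pvSplit, pvGoW, ihb]
      · simp [pvGo, pvStep, pvSplit, pvWordB, ihb]
    · constructor
      · intro p hp
        simp only [pvGo, pvSplit]
        rw [iha c hc]
        simp [pvStep, pvGoW, hc, hp]
      · simp only [pvGo, pvSplit]
        rw [iha c hc]
        simp [pvStep, hc, pvWordB_cons]

lemma pvSplit_cons_space (t : List Char) :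
    pvSplit (' ' :: t) = ([], (pvSplit t).1 :: (pvSplit t).2) := by
  simp [pvSplit]

lemma pvSplit_cons {c : Char} (t : List Char) (hc : c ≠ ' ') :
    pvSplit (c :: t) = (c :: (pvSplit t).1, (pvSplit t).2) := by
  simp [pvSplit, hc]

-- assembling both sides over an arbitrary character list
lemma pvMain (l : List Char) :
    (PySem.List.enumerate l).map (pvFA l) =
      PySem.Chars.join [' '] (((pvSplit l).1 :: (pvSplit l).2).map pvWordB) := by
  match l with
  | [] => rfl
  | h :: t =>
    rw [show PySem.List.enumerate (h :: t) (0 : Int) =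
          ((0 : Int), h) :: PySem.List.enumerate t (0 + 1) from rfl]
    rw [List.map_cons]
    have hh : pvFA (h :: t) (0, h) = h := by simp [pvFA]
    have hcast : ((0 : Int) + 1) = (((0 : Nat) : Int)) + 1 := by norm_num
    rw [hh, hcast, pvEnum_map_go (h :: t) t 0 h (by simp)]
    rw [List.map_cons, pvJoin_cons]
    obtain ⟨iha, ihb⟩ := pvGo_split t
    by_cases hc : h = ' '
    · subst hc
      rw [ihb, pvSplit_cons_space]
      simp [pvWordB, List.flatMap_map]
    · rw [iha h hc, pvSplit_cons t hc, pvWordB_cons]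
      simp [List.flatMap_map]

-- ===== VERDICT (by name: the statement is the Claim_ definition above) =====
theorem transformSentence_spec : Claim_equal_transformSentence := by
  intro sentence _
  unfold Spec_transformSentence
  simp only [transformSentence, transformSentence_alt, pvFoldA_eq_map, pvSplitOn_eq, pvMain]
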